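-- pv_equiv track=rewrite | github.com/zakNabhan/python_and_js_challenges | Mix/DifferebceOfMaxMinInList.py | difference_max_min
-- ===== SOURCE A (Python) =====
-- def difference_max_min(lst):
--
--     max_number = lst[0]
--     min_number = lst[0]
--
--     for i in lst:
--         if i > max_number:
--             max_number = i
--         if i < min_number:
--             min_number = i
--     difference = max_number - min_number
--     return "Differenc: "+ str(difference) + " Maxnumber:" + str(max_number) + \
--            " Minnumber: " + str(min_number)
-- ===== SOURCE B (Python) =====
-- def difference_max_min(lst):
--     s = sorted(lst)
--     min_number = s[0]
--     max_number = s[-1]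
--     return "Differenc: " + str(max_number - min_number) + " Maxnumber:" + \
--            str(max_number) + " Minnumber: " + str(min_number)
-- ===== Notes on version B (the rewrite author's own statement) =====
-- stated objective: alternative
-- what changed: Replaces the single running-extremes scan over the list with sort-then-index: B sorts the list and reads the minimum at s[0] and the maximum at s[-1].
import Mathlib
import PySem

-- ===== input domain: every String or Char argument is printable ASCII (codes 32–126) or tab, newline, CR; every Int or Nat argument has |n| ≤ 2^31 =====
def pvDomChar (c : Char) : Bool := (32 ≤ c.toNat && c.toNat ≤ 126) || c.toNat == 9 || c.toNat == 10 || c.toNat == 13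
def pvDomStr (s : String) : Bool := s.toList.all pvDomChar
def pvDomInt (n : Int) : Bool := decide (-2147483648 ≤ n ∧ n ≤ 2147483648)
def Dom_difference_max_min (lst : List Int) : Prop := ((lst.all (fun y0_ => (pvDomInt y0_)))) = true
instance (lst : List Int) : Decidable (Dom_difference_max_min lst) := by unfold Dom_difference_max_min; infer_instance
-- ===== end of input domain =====

-- B replaces A's running-extremes scan by sort-then-index (s[0], s[-1]); equal on nonempty lists.

-- ===== PORT A =====
-- A: seed max/min with lst[0], then one pass updating both, then format.
def difference_max_min (lst : List Int) : String :=
  match lst with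
  | [] => ""  -- Python: lst[0] raises IndexError here; excluded by Pre_
  | x :: _ =>
    let p := lst.foldl (fun (p : Int × Int) i =>
      let mx := if i > p.1 then i else p.1
      let mn := if i < p.2 then i else p.2
      (mx, mn)) (x, x)
    "Differenc: " ++ PySem.Int.toStr (p.1 - p.2) ++ " Maxnumber:" ++ PySem.Int.toStr p.1
      ++ " Minnumber: " ++ PySem.Int.toStr p.2

-- ===== PORT B =====
-- B: s = sorted(lst); min = s[0]; max = s[-1]; format.
def difference_max_min_alt (lst : List Int) : String :=
  let s := PySem.List.sorted lst (fun x => x) false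
  match PySem.List.pyGet? s 0, PySem.List.pyGet? s (-1) with
  | some mn, some mx =>
    "Differenc: " ++ PySem.Int.toStr (mx - mn) ++ " Maxnumber:" ++ PySem.Int.toStr mx
      ++ " Minnumber: " ++ PySem.Int.toStr mn
  | _, _ => ""  -- Python: s[0] raises IndexError (empty list); excluded by Pre_

-- ===== PRECONDITION & SPEC =====
-- Both programs raise IndexError on the empty list.
def Pre_difference_max_min (lst : List Int) : Prop := lst ≠ []
instance (lst : List Int) : Decidable (Pre_difference_max_min lst) := by unfold Pre_difference_max_min; infer_instance
def pvWitness_difference_max_min : List Int := ([3, 1, 2])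
def Spec_difference_max_min (lst : List Int) (out : String) : Prop := out = difference_max_min_alt lst
instance (lst : List Int) (out : String) : Decidable (Spec_difference_max_min lst out) := by unfold Spec_difference_max_min; infer_instance

-- ===== CLAIM (what is proved, stated in full; the proofs are below) =====
def Claim_equal_difference_max_min : Prop := ∀ (lst : List Int), Dom_difference_max_min lst → Pre_difference_max_min lst → Spec_difference_max_min lst (difference_max_min lst)

-- ===== LEMMAS AND PROOFS =====

-- A's fold step is (max, min).
theorem fold_step_eq : (fun (p : Int × Int) i =>
      let mx := if i > p.1 then i else p.1
      let mn := if i < p.2 then i else p.2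
      (mx, mn)) = fun (p : Int × Int) i => (max p.1 i, min p.2 i) := by
  funext p i
  simp only [max_def, min_def, Prod.mk.injEq]
  constructor <;> split_ifs <;> omega

theorem foldl_max_mem (lst : List Int) (x : Int) : lst.foldl max x ∈ x :: lst := by
  induction lst generalizing x with
  | nil => simp
  | cons h t ih =>
    have := ih (max x h)
    simp only [List.foldl_cons, List.mem_cons] at this ⊢
    rcases this with h1 | h1
    · rcases max_choice x h with h2 | h2
      · exact Or.inl (h1.trans h2)
      · exact Or.inr (Or.inl (h1.trans h2))
    · exact Or.inr (Or.inr h1)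

theorem foldl_min_mem (lst : List Int) (x : Int) : lst.foldl min x ∈ x :: lst := by
  induction lst generalizing x with
  | nil => simp
  | cons h t ih =>
    have := ih (min x h)
    simp only [List.foldl_cons, List.mem_cons] at this ⊢
    rcases this with h1 | h1
    · rcases min_choice x h with h2 | h2
      · exact Or.inl (h1.trans h2)
      · exact Or.inr (Or.inl (h1.trans h2))
    · exact Or.inr (Or.inr h1)

theorem le_foldl_max (lst : List Int) (x : Int) : x ≤ lst.foldl max x ∧ ∀ y ∈ lst, y ≤ lst.foldl max x := by
  induction lst generalizing x with
  | nil => simp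
  | cons h t ih =>
    obtain ⟨h1, h2⟩ := ih (max x h)
    refine ⟨le_trans (le_max_left _ _) h1, ?_⟩
    intro y hy
    rcases List.mem_cons.mp hy with rfl | hy
    · exact le_trans (le_max_right _ _) h1
    · exact h2 y hy

theorem foldl_min_le (lst : List Int) (x : Int) : lst.foldl min x ≤ x ∧ ∀ y ∈ lst, lst.foldl min x ≤ y := by
  induction lst generalizing x with
  | nil => simp
  | cons h t ih =>
    obtain ⟨h1, h2⟩ := ih (min x h)
    refine ⟨le_trans h1 (min_le_left _ _), ?_⟩
    intro y hy
    rcases List.mem_cons.mp hy with rfl | hy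
    · exact le_trans h1 (min_le_right _ _)
    · exact h2 y hy

-- in a ≤-pairwise list, every element is ≤ the last
theorem pairwise_le_getLast (l : List Int) (hp : l.Pairwise (· ≤ ·)) (h : l ≠ []) :
    ∀ y ∈ l, y ≤ l.getLast h := by
  induction l with
  | nil => simp at h
  | cons a t ih =>
    intro y hy
    cases t with
    | nil => simp at hy; simp [hy, List.getLast]
    | cons b u =>
      have hp' := (List.pairwise_cons.mp hp)
      rcases List.mem_cons.mp hy with rfl | hy'
      · have hb : y ≤ (b :: u).getLast (by simp) :=
          hp'.1 _ (List.getLast_mem _)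
        simpa [List.getLast] using hb
      · have := ih hp'.2 (by simp) y hy'
        simpa [List.getLast] using this

theorem fold_pair (L : List Int) (a b : Int) :
    L.foldl (fun (p : Int × Int) i => (max p.1 i, min p.2 i)) (a, b)
      = (L.foldl max a, L.foldl min b) := by
  induction L generalizing a b with
  | nil => rfl
  | cons h t ih => simpa using ih (max a h) (min b h)
theorem difference_max_min_spec : Claim_equal_difference_max_min := by
  intro lst _ hpre
  unfold Spec_difference_max_min
  cases lst with
  | nil => exact absurd rfl hpre
  | cons x t =>
    set L := x :: t with hL
    have hsne : PySem.List.sorted L (fun x => x) false ≠ [] := by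
      simp [PySem.List.sorted_eq_nil_iff, hL]
    obtain ⟨m, s, hs⟩ := List.exists_cons_of_ne_nil hsne
    have hperm := PySem.List.sorted_perm L (fun x => x) false
    have hpw : (PySem.List.sorted L (fun x => x) false).Pairwise (· ≤ ·) := by
      simpa using PySem.List.sorted_pairwise L (fun x => x)
    rw [hs] at hperm hpw
    have hget0 : PySem.List.pyGet? (m :: s) 0 = some m := by
      simp [PySem.List.pyGet?, PySem.List.pyIdx?]
    have hlastmem : (m :: s).getLast (by simp) ∈ m :: s := List.getLast_mem _
    have hgetneg : PySem.List.pyGet? (m :: s) (-1) = some ((m :: s).getLast (by simp)) := by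
      simp [PySem.List.pyGet?, PySem.List.pyIdx?, List.getLast_eq_getElem]
      rfl
    -- min side: head of sorted = foldl min
    have hmmemL : m ∈ L := (hperm.mem_iff).mp (by simp)
    have hminL := foldl_min_le L x
    have hminmem : L.foldl min x ∈ L := by
      have := foldl_min_mem L x
      rcases List.mem_cons.mp this with h1 | h1
      · rw [h1, hL]; simp
      · exact h1
    have hmle : ∀ y ∈ L, m ≤ y := by
      intro y hy
      have : y ∈ m :: s := (hperm.mem_iff).mpr hy
      rcases List.mem_cons.mp this with rfl | hy'
      · exact le_refl _
      · exact (List.pairwise_cons.mp hpw).1 y hy'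
    have hmin_eq : L.foldl min x = m :=
      le_antisymm (hminL.2 m hmmemL) (hmle _ hminmem)
    -- max side: last of sorted = foldl max
    set g := (m :: s).getLast (by simp) with hg
    have hgmemL : g ∈ L := (hperm.mem_iff).mp hlastmem
    have hmaxL := le_foldl_max L x
    have hmaxmem : L.foldl max x ∈ L := by
      have := foldl_max_mem L x
      rcases List.mem_cons.mp this with h1 | h1
      · rw [h1, hL]; simp
      · exact h1
    have hgge : ∀ y ∈ L, y ≤ g := by
      intro y hy
      exact pairwise_le_getLast (m :: s) hpw (by simp) y ((hperm.mem_iff).mpr hy)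
    have hmax_eq : L.foldl max x = g :=
      le_antisymm (hgge _ hmaxmem) (hmaxL.2 g hgmemL)
    show difference_max_min L = difference_max_min_alt L
    rw [hL]
    simp only [difference_max_min, difference_max_min_alt, fold_step_eq, fold_pair, ← hL,
      hs, hget0, hgetneg, hmin_eq, hmax_eq]
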